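-- pv_equiv track=rewrite | github.com/SakshamG30/Optimisation | Code/Assignment 2/solution1.py | consecutive_numbers
-- ===== SOURCE A (Python) =====
-- from typing import List, Set, Dict
--
-- def consecutive_numbers(list: List, length: int, elements: Set) -> Dict[int, int]:
--     """
--         Identifies consecutive occurrences of specified elements in a list, supporting circular
--         handling by wrapping around the list. This function returns the starting index and
--         length of each consecutive block containing only the specified elements.
--
--         Args:
--         - list (List): The input list to analyze.
--         - length (int): The length of relevant items in the list, accounting for circular behavior.
--         - elements (Set): The set of elements to count consecutively.
--
--         Returns:
--         - Dict[int, int]: A dictionary where each key is the starting index of a consecutive sequence,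
--                           and each value is the length of that sequence.
--     """
--     result = {}
--
--     # We iterate from position 0 to position len(list)*2 and count the number of occurrence.  We reset when we see something else
--     have_seen_something_else = False
--     nb_consecutives = 0  # Only start counting after we have seen something from outside [elements]
--
--     for i in range(length * 2):
--         element = list[i % length]
--         if element in elements:
--             if have_seen_something_else:
--                 nb_consecutives += 1
--
--         else:  # element is not in elements
--             have_seen_something_else = True
--             if nb_consecutives != 0:
--                 start = i - nb_consecutives
--                 result[start] = nb_consecutives
--             nb_consecutives = 0
--
--     return result
-- ===== SOURCE B (Python) =====
-- def consecutive_numbers(list, length, elements):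
--     # Collect boundary positions in one scan, then emit the gap between each
--     # adjacent pair of boundaries (a different decomposition from A's counter/latch).
--     bs = [i for i in range(length * 2) if list[i % length] not in elements]
--     result = {}
--     for prev, cur in zip(bs, bs[1:]):
--         gap = cur - prev - 1
--         if gap > 0:
--             result[prev + 1] = gap
--     return result
-- ===== Notes on version B (the rewrite author's own statement) =====
-- stated objective: alternative
-- what changed: Replaces A's running counter/latch state machine with a one-pass collection of boundary indices followed by a pass over adjacent boundary pairs that emits each gap directly.
import Mathlib
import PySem

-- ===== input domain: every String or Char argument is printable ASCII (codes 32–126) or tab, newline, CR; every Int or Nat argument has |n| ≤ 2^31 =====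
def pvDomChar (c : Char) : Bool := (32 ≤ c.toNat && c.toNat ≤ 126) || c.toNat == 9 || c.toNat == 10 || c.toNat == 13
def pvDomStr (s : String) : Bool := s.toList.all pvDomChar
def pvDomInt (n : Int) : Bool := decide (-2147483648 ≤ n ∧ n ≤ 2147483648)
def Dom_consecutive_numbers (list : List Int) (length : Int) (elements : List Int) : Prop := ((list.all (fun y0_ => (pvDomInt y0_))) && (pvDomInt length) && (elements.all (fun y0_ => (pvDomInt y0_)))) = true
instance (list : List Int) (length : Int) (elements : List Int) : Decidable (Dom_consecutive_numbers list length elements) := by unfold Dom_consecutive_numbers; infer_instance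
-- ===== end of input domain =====

-- B replaces A's running counter/latch with a boundary-index scan plus a pass over
-- adjacent boundary pairs (alternative decomposition, same cost).


-- ===== PORT A =====
-- one step of A's loop body; state = (result dict, have_seen_something_else, nb_consecutives)
def stepA (list : List Int) (length : Int) (elements : List Int)
    (st : PySem.Dict Int Int × Bool × Int) (i : Int) : PySem.Dict Int Int × Bool × Int :=
  match PySem.List.pyGet? list (PySem.Int.mod i length) with
  | none => st            -- Python raises IndexError here; excluded by Pre_
  | some element =>
    if element ∈ elements then
      if st.2.1 then (st.1, st.2.1, st.2.2 + 1) else st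
    else
      if st.2.2 ≠ 0 then ((st.1.insert (i - st.2.2) st.2.2), true, 0)
      else (st.1, true, 0)

def consecutive_numbers (list : List Int) (length : Int) (elements : List Int) : List (Int × Int) :=
  (((PySem.List.pyRange 0 (length * 2) 1).foldl (stepA list length elements)
      (PySem.Dict.empty, false, 0)).1).items

-- ===== PORT B =====
-- the comprehension's filter: i is a boundary (list[i % length] not in elements)
def isBoundary (list : List Int) (length : Int) (elements : List Int) (i : Int) : Bool :=
  match PySem.List.pyGet? list (PySem.Int.mod i length) with
  | none => false         -- Python raises IndexError here; excluded by Pre_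
  | some e => !(decide (e ∈ elements))

-- the body of B's loop over zip(bs, bs[1:])
def stepB (res : PySem.Dict Int Int) (p : Int × Int) : PySem.Dict Int Int :=
  if p.2 - p.1 - 1 > 0 then res.insert (p.1 + 1) (p.2 - p.1 - 1) else res

def consecutive_numbers_alt (list : List Int) (length : Int) (elements : List Int) : List (Int × Int) :=
  (((((PySem.List.pyRange 0 (length * 2) 1).filter (isBoundary list length elements)).zip
      (((PySem.List.pyRange 0 (length * 2) 1).filter (isBoundary list length elements)).tail)).foldl
      stepB PySem.Dict.empty)).items

-- ===== PRECONDITION & SPEC =====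
-- Pre_ excludes exactly the inputs where A (and B) raise IndexError: length > len(list).
def Pre_consecutive_numbers (list : List Int) (length : Int) (elements : List Int) : Prop :=
  length ≤ (list.length : Int)
instance (list : List Int) (length : Int) (elements : List Int) : Decidable (Pre_consecutive_numbers list length elements) := by unfold Pre_consecutive_numbers; infer_instance

def pvWitness_consecutive_numbers : List Int × Int × List Int := ([1, 2, 3, 2, 2], 5, [2])

def Spec_consecutive_numbers (list : List Int) (length : Int) (elements : List Int) (out : List (Int × Int)) : Prop := out = consecutive_numbers_alt list length elements
instance (list : List Int) (length : Int) (elements : List Int) (out : List (Int × Int)) : Decidable (Spec_consecutive_numbers list length elements out) := by unfold Spec_consecutive_numbers; infer_instance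

-- ===== CLAIM (what is proved, stated in full; the proofs are below) =====
def Claim_equal_consecutive_numbers : Prop := ∀ (list : List Int) (length : Int) (elements : List Int), Dom_consecutive_numbers list length elements → Pre_consecutive_numbers list length elements → Spec_consecutive_numbers list length elements (consecutive_numbers list length elements)

-- ===== LEMMAS AND PROOFS =====

-- proof-side reformulation of B's pair loop: fold over adjacent pairs with a carried previous boundary
def foldPairs (res : PySem.Dict Int Int) : List Int → PySem.Dict Int Int
  | [] => res
  | [_] => res
  | p :: q :: rest => foldPairs (stepB res (p, q)) (q :: rest)

lemma zip_tail_foldl (bs : List Int) (res : PySem.Dict Int Int) :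
    (bs.zip bs.tail).foldl stepB res = foldPairs res bs := by
  induction bs generalizing res with
  | nil => rfl
  | cons p rest ih =>
    cases rest with
    | nil => rfl
    | cons q rest' =>
      simp only [List.tail_cons, List.zip_cons_cons, List.foldl_cons, foldPairs]
      exact ih (stepB res (p, q))

-- after a boundary at prev (< a), A's counter is a - prev - 1 and the two loops agree
lemma loop_after (list : List Int) (length : Int) (elements : List Int)
    (b : Int) :
    ∀ (a prev : Int) (res : PySem.Dict Int Int), prev < a →
    (∀ i, a ≤ i → i < b → (PySem.List.pyGet? list (PySem.Int.mod i length)).isSome) →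
    ((PySem.List.pyRange a b 1).foldl (stepA list length elements) (res, true, a - prev - 1)).1
      = foldPairs res (prev :: (PySem.List.pyRange a b 1).filter (isBoundary list length elements)) := by
  have hwf : ∀ a : Int, a < b → (b - (a + 1)).toNat < (b - a).toNat := by omega
  intro a
  induction hn : (b - a).toNat using Nat.strong_induction_on generalizing a with
  | _ n ih =>
  intro prev res hprev hsome
  by_cases hab : b ≤ a
  · rw [PySem.List.pyRange_one_eq_nil hab]; rfl
  · replace hab : a < b := by omega
    rw [PySem.List.pyRange_one_cons hab]
    have hs := hsome a le_rfl hab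
    obtain ⟨e, he⟩ := Option.isSome_iff_exists.mp hs
    simp only [List.foldl_cons, List.filter_cons]
    have hsome' : ∀ i, a + 1 ≤ i → i < b → (PySem.List.pyGet? list (PySem.Int.mod i length)).isSome := by
      intro i h1 h2; exact hsome i (by omega) h2
    by_cases hmem : e ∈ elements
    · -- not a boundary
      have hb : isBoundary list length elements a = false := by
        simp [isBoundary, he, hmem]
      rw [hb]
      have hA : stepA list length elements (res, true, a - prev - 1) a
          = (res, true, (a + 1) - prev - 1) := by
        simp only [stepA, he, if_pos hmem, if_true, Prod.mk.injEq]
        exact ⟨trivial, trivial, by omega⟩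
      rw [hA]
      simpa using ih _ (hn ▸ hwf a hab) (a + 1) rfl prev res (by omega) hsome'
    · -- boundary at a
      have hb : isBoundary list length elements a = true := by
        simp [isBoundary, he, hmem]
      rw [hb]
      have hA : stepA list length elements (res, true, a - prev - 1) a
          = (stepB res (prev, a), true, (a + 1) - a - 1) := by
        simp only [stepA, he, stepB]
        rw [if_neg hmem]
        by_cases hz : a - prev - 1 = 0
        · rw [if_neg (by omega), if_neg (by omega)]
          simp only [Prod.mk.injEq]
          exact ⟨trivial, trivial, by omega⟩
        · rw [if_pos (by omega), if_pos (by omega)]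
          simp only [Prod.mk.injEq]
          exact ⟨by rw [show a - (a - prev - 1) = prev + 1 by omega], trivial, by omega⟩
      rw [hA]
      exact ih _ (hn ▸ hwf a hab) (a + 1) rfl a (stepB res (prev, a)) (by omega) hsome'

-- before the first boundary, A records nothing and B's pair list is still empty
lemma loop_before (list : List Int) (length : Int) (elements : List Int)
    (b : Int) :
    ∀ (a : Int) (res : PySem.Dict Int Int),
    (∀ i, a ≤ i → i < b → (PySem.List.pyGet? list (PySem.Int.mod i length)).isSome) →
    ((PySem.List.pyRange a b 1).foldl (stepA list length elements) (res, false, 0)).1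
      = foldPairs res ((PySem.List.pyRange a b 1).filter (isBoundary list length elements)) := by
  have hwf : ∀ a : Int, a < b → (b - (a + 1)).toNat < (b - a).toNat := by omega
  intro a
  induction hn : (b - a).toNat using Nat.strong_induction_on generalizing a with
  | _ n ih =>
  intro res hsome
  by_cases hab : b ≤ a
  · rw [PySem.List.pyRange_one_eq_nil hab]; rfl
  · replace hab : a < b := by omega
    rw [PySem.List.pyRange_one_cons hab]
    have hs := hsome a le_rfl hab
    obtain ⟨e, he⟩ := Option.isSome_iff_exists.mp hs
    simp only [List.foldl_cons, List.filter_cons]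
    have hsome' : ∀ i, a + 1 ≤ i → i < b → (PySem.List.pyGet? list (PySem.Int.mod i length)).isSome := by
      intro i h1 h2; exact hsome i (by omega) h2
    by_cases hmem : e ∈ elements
    · have hb : isBoundary list length elements a = false := by
        simp [isBoundary, he, hmem]
      rw [hb]
      have hA : stepA list length elements (res, false, 0) a = (res, false, 0) := by
        simp [stepA, he, hmem]
      rw [hA]
      simpa using ih _ (hn ▸ hwf a hab) (a + 1) rfl res hsome'
    · have hb : isBoundary list length elements a = true := by
        simp [isBoundary, he, hmem]
      rw [hb]
      have hA : stepA list length elements (res, false, 0) a = (res, true, (a + 1) - a - 1) := by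
        simp only [stepA, he]
        rw [if_neg hmem, if_neg (by omega)]
        simp only [Prod.mk.injEq]
        exact ⟨trivial, trivial, by omega⟩
      rw [hA]
      exact loop_after list length elements b (a + 1) a res (by omega) hsome'

-- ===== VERDICT (by name: the statement is the Claim_ definition above) =====
theorem consecutive_numbers_spec : Claim_equal_consecutive_numbers := by
  intro list length elements _ hpre
  unfold Spec_consecutive_numbers consecutive_numbers consecutive_numbers_alt
  rw [zip_tail_foldl]
  congr 1
  apply loop_before
  intro i h0 h2L
  have hlenpos : 0 < length := by omega
  have h1 : 0 ≤ PySem.Int.mod i length := PySem.Int.mod_nonneg i hlenpos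
  have h2 : PySem.Int.mod i length < length := PySem.Int.mod_lt i hlenpos
  have : PySem.List.pyGet? list (PySem.Int.mod i length) ≠ none := by
    intro hc
    rw [PySem.List.pyGet?_eq_none_iff] at hc
    unfold Pre_consecutive_numbers at hpre
    simp only [PySem.Raise.InRange, not_and, not_lt] at hc
    omega
  exact Option.isSome_iff_ne_none.mpr this
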